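-- pv_equiv track=rewrite | github.com/johnrcumming/DyLoRA-MoE | entrypoint.py | add_platform_defaults
-- ===== SOURCE A (Python) =====
-- def add_platform_defaults(args, mode, platform):
--     """Add platform-specific default arguments if not provided."""
--     args_dict = {}
--
--     # Parse existing args to avoid duplicates
--     i = 0
--     while i < len(args):
--         if args[i].startswith('--'):
--             key = args[i]
--             if i + 1 < len(args) and not args[i + 1].startswith('--'):
--                 args_dict[key] = args[i + 1]
--                 i += 2
--             else:
--                 args_dict[key] = True
--                 i += 1
--         else:
--             i += 1
--
--     defaults = []
--
--     if mode == "train":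
--         # Training defaults based on platform
--         if platform == "vertex-ai":
--             # Vertex AI has reliable hardware
--             if "--train_batch_size" not in args_dict:
--                 defaults.extend(["--train_batch_size", "4"])
--             if "--eval_batch_size" not in args_dict:
--                 defaults.extend(["--eval_batch_size", "4"])
--             if "--gradient_accumulation_steps" not in args_dict:
--                 defaults.extend(["--gradient_accumulation_steps", "32"])
--
--         elif platform == "vast-ai":
--             # Vast.ai hardware varies, be conservative
--             if "--train_batch_size" not in args_dict:
--                 defaults.extend(["--train_batch_size", "2"])
--             if "--eval_batch_size" not in args_dict:
--                 defaults.extend(["--eval_batch_size", "2"])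
--             if "--gradient_accumulation_steps" not in args_dict:
--                 defaults.extend(["--gradient_accumulation_steps", "64"])
--
--         # Common training defaults
--         if "--num_epochs" not in args_dict:
--             defaults.extend(["--num_epochs", "10"])
--         if "--num_experts" not in args_dict:
--             defaults.extend(["--num_experts", "2"])
--         if "--bf16" not in args_dict and "--fp16" not in args_dict:
--             defaults.append("--bf16")
--
--     elif mode == "benchmark":
--         # Benchmarking defaults
--         if "--max-samples" not in args_dict:
--             defaults.extend(["--max-samples", "164"])  # Full HumanEval
--         if "--temperature" not in args_dict:
--             defaults.extend(["--temperature", "0.2"])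
--         if "--max-tokens" not in args_dict:
--             defaults.extend(["--max-tokens", "256"])
--
--     return args + defaults
-- ===== SOURCE B (Python) =====
-- def add_platform_defaults(args, mode, platform):
--     """Add platform-specific default arguments if not provided."""
--     # Inverted data flow vs the dict-parse approach: first build the FULL
--     # candidate default list for this mode/platform (each entry = guard flags
--     # that suppress it, plus the tokens it contributes); then walk args once,
--     # CANCELLING every pending entry whose guard flag is seen; the survivors
--     # are exactly the defaults to append.
--     if mode == "train":
--         if platform == "vertex-ai":
--             pending = [(("--train_batch_size",), ["--train_batch_size", "4"]),
--                        (("--eval_batch_size",), ["--eval_batch_size", "4"]),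
--                        (("--gradient_accumulation_steps",), ["--gradient_accumulation_steps", "32"])]
--         elif platform == "vast-ai":
--             pending = [(("--train_batch_size",), ["--train_batch_size", "2"]),
--                        (("--eval_batch_size",), ["--eval_batch_size", "2"]),
--                        (("--gradient_accumulation_steps",), ["--gradient_accumulation_steps", "64"])]
--         else:
--             pending = []
--         pending = pending + [(("--num_epochs",), ["--num_epochs", "10"]),
--                              (("--num_experts",), ["--num_experts", "2"]),
--                              (("--bf16", "--fp16"), ["--bf16"])]
--     elif mode == "benchmark":
--         pending = [(("--max-samples",), ["--max-samples", "164"]),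
--                    (("--temperature",), ["--temperature", "0.2"]),
--                    (("--max-tokens",), ["--max-tokens", "256"])]
--     else:
--         pending = []
--
--     for tok in args:
--         if tok.startswith('--'):
--             pending = [entry for entry in pending if tok not in entry[0]]
--
--     out = list(args)
--     for entry in pending:
--         out.extend(entry[1])
--     return out
-- ===== Notes on version B (the rewrite author's own statement) =====
-- stated objective: alternative
-- what changed: Inverts A's data flow: instead of parsing args into a key->value dict and then appending defaults branch by branch, B builds the full candidate default list for (mode, platform) up front and cancels pending entries during a single pass over args, appending the survivors.
import Mathlib
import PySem

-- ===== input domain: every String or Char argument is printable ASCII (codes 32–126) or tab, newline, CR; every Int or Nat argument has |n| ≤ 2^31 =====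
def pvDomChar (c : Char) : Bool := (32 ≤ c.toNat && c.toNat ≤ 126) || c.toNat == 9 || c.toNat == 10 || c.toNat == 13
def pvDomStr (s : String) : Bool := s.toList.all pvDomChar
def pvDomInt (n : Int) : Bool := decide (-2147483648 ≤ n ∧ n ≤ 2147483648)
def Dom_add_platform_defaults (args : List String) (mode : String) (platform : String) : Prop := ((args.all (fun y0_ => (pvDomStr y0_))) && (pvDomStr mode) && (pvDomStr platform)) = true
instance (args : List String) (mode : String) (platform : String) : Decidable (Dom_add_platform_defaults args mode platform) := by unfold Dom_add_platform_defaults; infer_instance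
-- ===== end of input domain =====

-- B inverts A's data flow: instead of parsing args into a key→value dict and
-- appending defaults branch by branch, it builds the full candidate default
-- list up front and cancels entries in one pass over args (alternative).

-- ===== PORT A =====
-- A's while-loop over index i, as recursion on the remaining suffix of args
-- (i += 2 consumes two tokens, i += 1 one); values: some v for a key-value
-- pair, none standing for Python's True.
def parseArgsA : List String → PySem.Dict String (Option String) → PySem.Dict String (Option String)
  | [], d => d
  | x :: rest, d =>
    if PySem.Str.startswith x "--" then
      match rest with
      | y :: rest' =>
        if PySem.Str.startswith y "--" = false then
          parseArgsA rest' (d.insert x (some y))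
        else
          parseArgsA (y :: rest') (d.insert x none)
      | [] => parseArgsA [] (d.insert x none)
    else
      parseArgsA rest d

def add_platform_defaults (args : List String) (mode : String) (platform : String) : List String :=
  let args_dict := parseArgsA args PySem.Dict.empty
  let defaults : List String := []
  let defaults :=
    if mode = "train" then
      let defaults :=
        if platform = "vertex-ai" then
          let defaults := if args_dict.contains "--train_batch_size" = false then defaults ++ ["--train_batch_size", "4"] else defaults
          let defaults := if args_dict.contains "--eval_batch_size" = false then defaults ++ ["--eval_batch_size", "4"] else defaults
          let defaults := if args_dict.contains "--gradient_accumulation_steps" = false then defaults ++ ["--gradient_accumulation_steps", "32"] else defaults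
          defaults
        else if platform = "vast-ai" then
          let defaults := if args_dict.contains "--train_batch_size" = false then defaults ++ ["--train_batch_size", "2"] else defaults
          let defaults := if args_dict.contains "--eval_batch_size" = false then defaults ++ ["--eval_batch_size", "2"] else defaults
          let defaults := if args_dict.contains "--gradient_accumulation_steps" = false then defaults ++ ["--gradient_accumulation_steps", "64"] else defaults
          defaults
        else defaults
      let defaults := if args_dict.contains "--num_epochs" = false then defaults ++ ["--num_epochs", "10"] else defaults
      let defaults := if args_dict.contains "--num_experts" = false then defaults ++ ["--num_experts", "2"] else defaults
      let defaults := if (!args_dict.contains "--bf16" && !args_dict.contains "--fp16") = true then defaults ++ ["--bf16"] else defaults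
      defaults
    else if mode = "benchmark" then
      let defaults := if args_dict.contains "--max-samples" = false then defaults ++ ["--max-samples", "164"] else defaults
      let defaults := if args_dict.contains "--temperature" = false then defaults ++ ["--temperature", "0.2"] else defaults
      let defaults := if args_dict.contains "--max-tokens" = false then defaults ++ ["--max-tokens", "256"] else defaults
      defaults
    else defaults
  args ++ defaults

-- ===== PORT B =====
-- B's cancellation pass: each pending entry is (guard flags, tokens).
def add_platform_defaults_alt (args : List String) (mode : String) (platform : String) : List String :=
  let pending : List (List String × List String) :=
    if mode = "train" then
      let pending :=
        if platform = "vertex-ai" then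
          [(["--train_batch_size"], ["--train_batch_size", "4"]),
           (["--eval_batch_size"], ["--eval_batch_size", "4"]),
           (["--gradient_accumulation_steps"], ["--gradient_accumulation_steps", "32"])]
        else if platform = "vast-ai" then
          [(["--train_batch_size"], ["--train_batch_size", "2"]),
           (["--eval_batch_size"], ["--eval_batch_size", "2"]),
           (["--gradient_accumulation_steps"], ["--gradient_accumulation_steps", "64"])]
        else []
      pending ++ [(["--num_epochs"], ["--num_epochs", "10"]),
                  (["--num_experts"], ["--num_experts", "2"]),
                  (["--bf16", "--fp16"], ["--bf16"])]
    else if mode = "benchmark" then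
      [(["--max-samples"], ["--max-samples", "164"]),
       (["--temperature"], ["--temperature", "0.2"]),
       (["--max-tokens"], ["--max-tokens", "256"])]
    else []
  let pending := args.foldl
    (fun p tok => if PySem.Str.startswith tok "--" then p.filter (fun e => !e.1.contains tok) else p)
    pending
  pending.foldl (fun out e => out ++ e.2) args

-- ===== PRECONDITION & SPEC =====
def Spec_add_platform_defaults (args : List String) (mode : String) (platform : String) (out : List String) : Prop := out = add_platform_defaults_alt args mode platform
instance (args : List String) (mode : String) (platform : String) (out : List String) : Decidable (Spec_add_platform_defaults args mode platform out) := by unfold Spec_add_platform_defaults; infer_instance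

-- ===== CLAIM (what is proved, stated in full; the proofs are below) =====
def Claim_equal_add_platform_defaults : Prop := ∀ (args : List String) (mode : String) (platform : String), Dom_add_platform_defaults args mode platform → Spec_add_platform_defaults args mode platform (add_platform_defaults args mode platform)

-- ===== LEMMAS AND PROOFS =====

-- A's parse loop records exactly the '--'-prefixed tokens as keys
theorem parseArgsA_contains (args : List String) (d : PySem.Dict String (Option String))
    (k : String) (hk : PySem.Str.startswith k "--" = true) :
    (parseArgsA args d).contains k = (d.contains k || args.contains k) := by
  fun_induction parseArgsA args d with
  | case1 d => simp
  | case2 x d hx y rest' hy ih =>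
      have hky : k ≠ y := fun h => by rw [← h, hk] at hy; cases hy
      rw [ih]
      simp [PySem.Dict.contains_insert, hky, beq_eq_decide, Bool.or_comm, Bool.or_left_comm, Bool.or_assoc]
  | case3 x d hx y rest' hy ih =>
      rw [ih]
      simp [PySem.Dict.contains_insert, beq_eq_decide, Bool.or_comm, Bool.or_left_comm, Bool.or_assoc]
  | case4 x d hx ih =>
      rw [ih]
      simp [PySem.Dict.contains_insert, beq_eq_decide, Bool.or_comm]
  | case5 x rest d hx ih =>
      have hkx : k ≠ x := fun h => by rw [h] at hk; exact hx hk
      rw [ih]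
      simp [hkx, Bool.or_comm]

-- B's cancellation fold is a filter by "no flag token of args is a guard"
theorem cancel_eq_filter (args : List String) (pending : List (List String × List String)) :
    args.foldl
      (fun p tok => if PySem.Str.startswith tok "--" then p.filter (fun e => !e.1.contains tok) else p)
      pending
    = pending.filter (fun e => args.all (fun tok => !PySem.Str.startswith tok "--" || !e.1.contains tok)) := by
  induction args generalizing pending with
  | nil => simp
  | cons t rest ih =>
      simp only [List.foldl_cons, List.all_cons]
      by_cases ht : PySem.Str.startswith t "--"
      · rw [if_pos ht, ih, List.filter_filter]
        have ht' : PySem.Chars.startswith t.toList ['-', '-'] = true := by simpa using ht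
        simp [ht', Bool.and_comm]
      · rw [if_neg ht, ih]
        have ht' : PySem.Chars.startswith t.toList ['-', '-'] = false := by simpa using ht
        simp [ht']

-- for guard flags (all '--'-prefixed), survival = none of them occurs in args
theorem guard_all (args gs : List String)
    (h : ∀ k ∈ gs, PySem.Str.startswith k "--" = true) :
    args.all (fun tok => !PySem.Str.startswith tok "--" || !gs.contains tok)
      = gs.all (fun k => !args.contains k) := by
  rw [Bool.eq_iff_iff]
  simp only [List.all_eq_true, Bool.or_eq_true, Bool.not_eq_eq_eq_not, Bool.not_true,
    List.contains_eq_mem, decide_eq_false_iff_not]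
  constructor
  · intro hall k hk hka
    rcases hall k hka with hfl | hnk
    · rw [h k hk] at hfl; cases hfl
    · exact hnk hk
  · intro hall tok htok
    exact Or.inr (fun hm => hall tok hm htok)

-- dict membership for a concrete '--' key is list membership in args
theorem key_eq (args : List String) (k : String) (hk : PySem.Str.startswith k "--" = true) :
    (parseArgsA args PySem.Dict.empty).contains k = args.contains k := by
  rw [parseArgsA_contains args _ k hk]
  simp

set_option maxHeartbeats 1000000 in
theorem add_platform_defaults_spec : Claim_equal_add_platform_defaults := by
  unfold Claim_equal_add_platform_defaults
  intro args mode platform _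
  unfold Spec_add_platform_defaults
  simp only [add_platform_defaults, add_platform_defaults_alt, cancel_eq_filter,
    PySem.List.foldl_append_eq_flatMap]
  rw [key_eq args "--train_batch_size" (by decide),
      key_eq args "--eval_batch_size" (by decide),
      key_eq args "--gradient_accumulation_steps" (by decide),
      key_eq args "--num_epochs" (by decide),
      key_eq args "--num_experts" (by decide),
      key_eq args "--bf16" (by decide),
      key_eq args "--fp16" (by decide),
      key_eq args "--max-samples" (by decide),
      key_eq args "--temperature" (by decide),
      key_eq args "--max-tokens" (by decide)]
  by_cases hm : mode = "train"
  · rw [if_pos hm, if_pos hm]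
    by_cases hp : platform = "vertex-ai"
    · rw [if_pos hp, if_pos hp]
      simp only [List.cons_append, List.nil_append, List.filter_cons, List.filter_nil,
        guard_all args ["--train_batch_size"] (by decide),
        guard_all args ["--eval_batch_size"] (by decide),
        guard_all args ["--gradient_accumulation_steps"] (by decide),
        guard_all args ["--num_epochs"] (by decide),
        guard_all args ["--num_experts"] (by decide),
        guard_all args ["--bf16", "--fp16"] (by decide),
        List.all_cons, List.all_nil]
      cases args.contains "--train_batch_size" <;>
        cases args.contains "--eval_batch_size" <;>
          cases args.contains "--gradient_accumulation_steps" <;>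
            cases args.contains "--num_epochs" <;>
              cases args.contains "--num_experts" <;>
                cases args.contains "--bf16" <;>
                  cases args.contains "--fp16" <;> rfl
    · rw [if_neg hp, if_neg hp]
      by_cases hq : platform = "vast-ai"
      · rw [if_pos hq, if_pos hq]
        simp only [List.cons_append, List.nil_append, List.filter_cons, List.filter_nil,
          guard_all args ["--train_batch_size"] (by decide),
          guard_all args ["--eval_batch_size"] (by decide),
          guard_all args ["--gradient_accumulation_steps"] (by decide),
          guard_all args ["--num_epochs"] (by decide),
          guard_all args ["--num_experts"] (by decide),
          guard_all args ["--bf16", "--fp16"] (by decide),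
          List.all_cons, List.all_nil]
        cases args.contains "--train_batch_size" <;>
          cases args.contains "--eval_batch_size" <;>
            cases args.contains "--gradient_accumulation_steps" <;>
              cases args.contains "--num_epochs" <;>
                cases args.contains "--num_experts" <;>
                  cases args.contains "--bf16" <;>
                    cases args.contains "--fp16" <;> rfl
      · rw [if_neg hq, if_neg hq]
        simp only [List.nil_append, List.filter_cons, List.filter_nil,
          guard_all args ["--num_epochs"] (by decide),
          guard_all args ["--num_experts"] (by decide),
          guard_all args ["--bf16", "--fp16"] (by decide),
          List.all_cons, List.all_nil]
        cases args.contains "--num_epochs" <;>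
          cases args.contains "--num_experts" <;>
            cases args.contains "--bf16" <;>
              cases args.contains "--fp16" <;> rfl
  · rw [if_neg hm, if_neg hm]
    by_cases hb : mode = "benchmark"
    · rw [if_pos hb, if_pos hb]
      simp only [List.nil_append, List.filter_cons, List.filter_nil,
        guard_all args ["--max-samples"] (by decide),
        guard_all args ["--temperature"] (by decide),
        guard_all args ["--max-tokens"] (by decide),
        List.all_cons, List.all_nil]
      cases args.contains "--max-samples" <;>
        cases args.contains "--temperature" <;>
          cases args.contains "--max-tokens" <;> rfl
    · rw [if_neg hb, if_neg hb]
      rfl
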